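-- pv_equiv track=rewrite | github.com/pugcute/TIL | algorithm/프로그래머스/소수만들기.py | solution
-- ===== SOURCE A (Python) =====
-- from itertools import combinations
--
-- def get_sosu(num):
--     flag = 1
--     for i in range(2, int((num)**0.5) + 1):
--         if num % i == 0:
--             flag = 0
--             break
--     return flag
--
-- def solution(nums):
--     answer = 0
--     bounds = combinations(nums, 3)
--     tmp = 0
--     for bound in bounds:
--         tmp = sum(bound)
--         if get_sosu(tmp) == 1:
--             answer += 1
--     return answer
-- ===== SOURCE B (Python) =====
-- from itertools import combinations
--
-- def solution(nums):
--     def is_prime(s):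
--         if s < 2:
--             return False
--         i = 2
--         while i * i <= s:
--             if s % i == 0:
--                 return False
--             i += 1
--         return True
--
--     cnt = {}
--     for tri in combinations(nums, 3):
--         s = tri[0] + tri[1] + tri[2]
--         cnt[s] = cnt.get(s, 0) + 1
--     return sum(c for s, c in cnt.items() if is_prime(s))
-- ===== Notes on version B (the rewrite author's own statement) =====
-- stated objective: faster
-- what changed: B replaces the per-triple float-sqrt trial-division helper by a two-phase scheme: one pass over the triples builds a frequency dict of their sums, then an integer trial-division primality test (which correctly rejects 0 and 1) runs once per DISTINCT sum.
-- intended difference: On lists where some 3-combination sums to 0 or 1, A counts that triple as prime-sum (its trial division accepts 0 and 1), while B does not count it, since 0 and 1 are not prime, which is the intended behaviour of a prime-counting function. — e.g. on solution([0, 0, 0]): A returns 1, B returns 0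
import Mathlib
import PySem

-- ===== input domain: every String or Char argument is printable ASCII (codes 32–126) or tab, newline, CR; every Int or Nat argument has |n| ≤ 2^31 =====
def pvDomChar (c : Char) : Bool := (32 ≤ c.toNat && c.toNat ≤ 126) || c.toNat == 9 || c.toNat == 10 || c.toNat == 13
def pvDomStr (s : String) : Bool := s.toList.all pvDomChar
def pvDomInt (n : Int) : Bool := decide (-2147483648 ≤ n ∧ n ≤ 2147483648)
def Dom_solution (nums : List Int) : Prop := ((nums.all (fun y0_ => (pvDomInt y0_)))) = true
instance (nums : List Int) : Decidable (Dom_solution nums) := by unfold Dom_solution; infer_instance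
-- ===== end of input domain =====

-- B builds a frequency dict of the triple sums first and then runs one integer trial-division
-- primality test per DISTINCT sum (A tests every triple); B intentionally does not count
-- triple sums 0 and 1, which are not prime (see D_ below).

-- model of itertools.combinations(lst, k) (lexicographic by index), used by both ports
def combos : Nat → List Int → List (List Int)
  | 0, _ => [[]]
  | _ + 1, [] => []
  | k + 1, x :: rest => ((combos k rest).map (fun t => x :: t)) ++ combos (k + 1) rest

-- ===== PORT A =====
-- for i in range(2, int(num**0.5)+1): if num % i == 0: flag = 0; break
def get_sosuGo (num : Int) : List Int → Int
  | [] => 1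
  | i :: rest => if PySem.Int.mod num i = 0 then 0 else get_sosuGo num rest

-- int(num**0.5) = Nat.sqrt num.toNat exactly for the nonnegative num reached under Pre_
-- (float sqrt is correctly rounded and num ≤ 3·2^31 is far below the double-precision
-- boundary); a negative num makes Python's int((num)**0.5) raise TypeError (excluded by Pre_).
def get_sosu (num : Int) : Int :=
  get_sosuGo num (PySem.List.pyRange 2 ((Nat.sqrt num.toNat : Int) + 1) 1)

def solution (nums : List Int) : Int :=
  (combos 3 nums).foldl (fun answer bound =>
    let tmp := bound.sum
    if get_sosu tmp = 1 then answer + 1 else answer) 0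

-- ===== PORT B =====
-- while i * i <= s: if s % i == 0: return False; i += 1
-- (fuel only makes the loop structurally terminating; s.toNat + 1 iterations always suffice)
def isPrimeLoop (s : Int) : Nat → Int → Bool
  | 0, _ => true
  | fuel + 1, i =>
    if i * i ≤ s then
      if PySem.Int.mod s i = 0 then false else isPrimeLoop s fuel (i + 1)
    else true

def is_prime (s : Int) : Bool := if s < 2 then false else isPrimeLoop s (s.toNat + 1) 2

def solution_alt (nums : List Int) : Int :=
  -- cnt[s] = cnt.get(s, 0) + 1 over the triples, then sum the counts of the prime sums
  let cnt := (combos 3 nums).foldl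
    (fun d tri =>
      let s := tri.sum
      d.insert s (d.getD s 0 + 1)) PySem.Dict.empty
  cnt.items.foldl (fun acc p => if is_prime p.1 then acc + p.2 else acc) 0

-- ===== PRECONDITION & SPEC =====
-- Pre_ excludes exactly the inputs where some 3-combination has a negative sum: there
-- Python A raises TypeError (int of a complex float power).
def Pre_solution (nums : List Int) : Prop := ∀ t ∈ nums.sublists, t.length = 3 → 0 ≤ t.sum
instance (nums : List Int) : Decidable (Pre_solution nums) := by unfold Pre_solution; infer_instance
def pvWitness_solution : List Int := [1, 2, 4]

-- On lists where some 3-combination sums to 0 or 1, A counts that triple as prime-sum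
-- (its trial division accepts 0 and 1); B does not count it, since 0 and 1 are not prime,
-- which is the intended behaviour of a prime-counting function.
-- (the first two conjuncts are implied by the third — a triple summing to 0 or 1 must contain
-- an element ≤ 0 and an element ≥ 0 — and serve only to make the condition cheap to decide
-- on large all-positive or all-negative literal inputs)
def D_solution (nums : List Int) : Prop :=
  (∃ x ∈ nums, x ≤ 0) ∧ (∃ x ∈ nums, 0 ≤ x) ∧
  ∃ t ∈ nums.sublists, t.length = 3 ∧ (t.sum = 0 ∨ t.sum = 1)
instance (nums : List Int) : Decidable (D_solution nums) := by unfold D_solution; infer_instance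

def Spec_solution (nums : List Int) (out : Int) : Prop := ¬ D_solution nums → out = solution_alt nums
instance (nums : List Int) (out : Int) : Decidable (Spec_solution nums out) := by unfold Spec_solution; infer_instance

def pvDiffWitness_solution : List Int := [0, 0, 0]
def pvDiffWitnessOut_solution : Int × Int := (1, 0)

-- ===== CLAIM (what is proved, stated in full; the proofs are below) =====
def Claim_unchanged_solution : Prop := ∀ (nums : List Int), Dom_solution nums → Pre_solution nums → Spec_solution nums (solution nums)
def Claim_changed_solution : Prop := Dom_solution (pvDiffWitness_solution) ∧ Pre_solution (pvDiffWitness_solution) ∧ D_solution (pvDiffWitness_solution) ∧ solution (pvDiffWitness_solution) = pvDiffWitnessOut_solution.1 ∧ solution_alt (pvDiffWitness_solution) = pvDiffWitnessOut_solution.2 ∧ pvDiffWitnessOut_solution.1 ≠ pvDiffWitnessOut_solution.2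
def Claim_exact_solution : Prop := ∀ (nums : List Int), Dom_solution nums → Pre_solution nums → D_solution nums → solution nums ≠ solution_alt nums

-- ===== LEMMAS AND PROOFS =====

theorem get_sosuGo_eq_one {num : Int} {l : List Int} :
    get_sosuGo num l = 1 ↔ ∀ i ∈ l, PySem.Int.mod num i ≠ 0 := by
  induction l with
  | nil => simp [get_sosuGo]
  | cons i rest ih =>
    by_cases h : PySem.Int.mod num i = 0 <;> simp [get_sosuGo, h, ih]

theorem get_sosu_eq_one {s : Int} (_hs : 0 ≤ s) :
    get_sosu s = 1 ↔ ∀ j : Int, 2 ≤ j → j * j ≤ s → PySem.Int.mod s j ≠ 0 := by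
  rw [get_sosu, get_sosuGo_eq_one]
  constructor
  · intro h j h2 hjs
    refine h j ?_
    rw [PySem.List.mem_pyRange_one]
    refine ⟨h2, ?_⟩
    -- j ≤ Nat.sqrt s.toNat from j*j ≤ s
    have hj0 : 0 ≤ j := by omega
    have hjt : ((j.toNat : Int)) = j := Int.toNat_of_nonneg hj0
    have hcast : ((j.toNat * j.toNat : Nat) : Int) = j * j := by push_cast [hjt]; ring
    have := Nat.le_sqrt.mpr (show j.toNat * j.toNat ≤ s.toNat by omega)
    omega
  · intro h j hj
    rw [PySem.List.mem_pyRange_one] at hj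
    refine h j hj.1 ?_
    have hj0 : 0 ≤ j := by omega
    have hjt : ((j.toNat : Int)) = j := Int.toNat_of_nonneg hj0
    have hcast : ((j.toNat * j.toNat : Nat) : Int) = j * j := by push_cast [hjt]; ring
    have h2 := Nat.le_sqrt.mp (show j.toNat ≤ Nat.sqrt s.toNat by omega)
    omega

theorem isPrimeLoop_eq_true : ∀ (fuel : Nat) (s i : Int), (s + 1 - i).toNat ≤ fuel → 0 ≤ i →
    (isPrimeLoop s fuel i = true ↔ ∀ j : Int, i ≤ j → j * j ≤ s → PySem.Int.mod s j ≠ 0) := by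
  intro fuel
  induction fuel with
  | zero =>
    intro s i hn h0
    have hsi : s < i := by omega
    constructor
    · intro _ j hij hjs
      exfalso
      have hii : ¬ i * i ≤ s := by nlinarith
      have : i * i ≤ j * j := by nlinarith
      omega
    · intro _; rfl
  | succ n ih =>
    intro s i hn h0
    by_cases h : i * i ≤ s
    · have hlei : i ≤ s := by nlinarith
      rw [isPrimeLoop, if_pos h]
      by_cases hm : PySem.Int.mod s i = 0
      · rw [if_pos hm]
        constructor
        · intro hfalse; exact absurd hfalse (by simp)
        · intro hall; exact absurd (hall i le_rfl h) (by simp [hm])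
      · rw [if_neg hm]
        rw [ih s (i + 1) (by omega) (by omega)]
        constructor
        · intro hrec j hij hjs
          rcases eq_or_lt_of_le hij with rfl | hlt
          · exact hm
          · exact hrec j (by omega) hjs
        · intro hall j hij hjs
          exact hall j (by omega) hjs
    · rw [isPrimeLoop, if_neg h]
      constructor
      · intro _ j hij hjs
        exfalso
        have : i * i ≤ j * j := by nlinarith
        omega
      · intro _; rfl

theorem is_prime_eq_true {s : Int} (h2 : 2 ≤ s) :
    is_prime s = true ↔ ∀ j : Int, 2 ≤ j → j * j ≤ s → PySem.Int.mod s j ≠ 0 := by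
  rw [is_prime, if_neg (by omega)]
  exact isPrimeLoop_eq_true (s.toNat + 1) s 2 (by omega) (by omega)

-- on sums ≥ 2 the two primality tests agree
theorem get_sosu_eq_is_prime {s : Int} (h2 : 2 ≤ s) :
    (get_sosu s = 1) ↔ is_prime s = true := by
  rw [get_sosu_eq_one (by omega), is_prime_eq_true h2]

theorem is_prime_true_ge_two {s : Int} (h : is_prime s = true) : 2 ≤ s := by
  by_contra hc
  rw [is_prime, if_pos (by omega)] at h
  exact absurd h (by simp)

-- A says yes whenever B does (given a nonnegative sum)
theorem a_of_b {s : Int} (h : is_prime s = true) : get_sosu s = 1 :=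
  (get_sosu_eq_is_prime (is_prime_true_ge_two h)).mpr h

theorem foldl_filter_add (l : List (Int × Int)) (q : Int × Int → Bool) (a : Int) :
    l.foldl (fun acc p => if q p then acc + p.2 else acc) a
      = a + (l.map (fun p => if q p then p.2 else 0)).sum := by
  induction l generalizing a with
  | nil => simp
  | cons p rest ih =>
    simp only [List.foldl_cons, List.map_cons, List.sum_cons, ih]
    split_ifs <;> ring

theorem sum_ite_single (D : List Int) (a : Int) (hnd : D.Nodup) (ha : a ∈ D) (c : Int) :
    (D.map (fun k => if k = a then c else 0)).sum = c := by
  induction D with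
  | nil => simp at ha
  | cons x rest ih =>
    simp only [List.map_cons, List.sum_cons]
    rcases List.mem_cons.mp ha with rfl | hmem
    · rw [if_pos rfl]
      have hnotin : a ∉ rest := (List.nodup_cons.mp hnd).1
      have hz : (rest.map (fun k => if k = a then c else 0)).sum = 0 := by
        rw [List.sum_eq_zero]
        intro y hy
        rcases List.mem_map.mp hy with ⟨k, hk, rfl⟩
        rw [if_neg (by rintro rfl; exact hnotin hk)]
      rw [hz]; ring
    · have hxa : x ≠ a := by rintro rfl; exact (List.nodup_cons.mp hnd).1 hmem
      rw [if_neg hxa, ih (List.nodup_cons.mp hnd).2 hmem]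
      ring

theorem sum_map_add_aux (D : List Int) (f g : Int → Int) :
    (D.map (fun k => f k + g k)).sum = (D.map f).sum + (D.map g).sum := by
  induction D with
  | nil => simp
  | cons x rest ih => simp only [List.map_cons, List.sum_cons, ih]; ring

theorem sum_count_eq_countP (L : List Int) (D : List Int) (hnd : D.Nodup)
    (hsub : ∀ x ∈ L, x ∈ D) (p : Int → Bool) :
    (D.map (fun k => if p k then (L.count k : Int) else 0)).sum = (L.countP p : Int) := by
  induction L with
  | nil => simp
  | cons a L ih =>
    have hsplit : (fun k => if p k then ((a :: L).count k : Int) else 0)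
        = (fun k => (if p k then (L.count k : Int) else 0)
            + (if k = a then (if p a then (1 : Int) else 0) else 0)) := by
      funext k
      by_cases hk : k = a
      · subst hk
        simp [List.count_cons_self]
        split_ifs <;> push_cast <;> ring
      · have hc : (a :: L).count k = L.count k := by
          simp [List.count_cons, show ¬(a = k) from fun h => hk h.symm]
        simp [hc, hk]
    rw [hsplit]
    rw [sum_map_add_aux D (fun k => if p k then (L.count k : Int) else 0)
        (fun k => if k = a then (if p a then (1 : Int) else 0) else 0)]
    rw [ih (fun x hx => hsub x (List.mem_cons_of_mem a hx)),
        sum_ite_single D a hnd (hsub a (List.mem_cons_self))]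
    rw [List.countP_cons]
    push_cast
    split_ifs <;> ring

theorem solution_alt_eq_countP (nums : List Int) :
    solution_alt nums = ((combos 3 nums).countP (fun t => is_prime t.sum) : Int) := by
  rw [solution_alt]
  have hfold : (combos 3 nums).foldl
      (fun d tri => d.insert tri.sum (d.getD tri.sum 0 + 1)) PySem.Dict.empty
      = PySem.Dict.counter ((combos 3 nums).map (fun t => t.sum)) := by
    rw [← PySem.Dict.foldl_insert_getD_add_one_eq_counter, List.foldl_map]
  simp only []
  rw [hfold, PySem.Dict.items_counter]
  rw [foldl_filter_add, List.map_map]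
  have hcomp : ((fun p : Int × Int => if is_prime p.1 then p.2 else 0)
      ∘ (fun k => (k, (((combos 3 nums).map (fun t => t.sum)).count k : Int))))
      = fun k => if is_prime k then (((combos 3 nums).map (fun t => t.sum)).count k : Int) else 0 := by
    funext k; rfl
  rw [hcomp, sum_count_eq_countP _ _ (PySem.Set.nodup_ofList _)
      (fun x hx => (PySem.Set.mem_ofList _ _).mpr hx) is_prime]
  rw [List.countP_map]
  norm_num
  rfl

theorem solution_eq_countP (nums : List Int) :
    solution nums = ((combos 3 nums).countP (fun t => get_sosu t.sum = 1) : Int) := by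
  rw [solution]
  rw [PySem.List.foldl_ite_add_one]
  simp

-- membership in combos k l is exactly: sublist of length k
theorem mem_combos_iff : ∀ (l : List Int) (k : Nat) (t : List Int),
    t ∈ combos k l ↔ t.Sublist l ∧ t.length = k := by
  intro l
  induction l with
  | nil =>
    intro k t
    cases k with
    | zero =>
      simp only [combos, List.mem_singleton]
      constructor
      · rintro rfl; exact ⟨List.Sublist.refl _, rfl⟩
      · rintro ⟨hsub, hlen⟩
        cases List.sublist_nil.mp hsub
        rfl
    | succ k =>
      simp only [combos, List.not_mem_nil, false_iff, not_and]
      intro hsub hlen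
      cases List.sublist_nil.mp hsub
      simp at hlen
  | cons x rest ih =>
    intro k t
    cases k with
    | zero =>
      simp only [combos, List.mem_singleton]
      constructor
      · rintro rfl; exact ⟨List.nil_sublist _, rfl⟩
      · rintro ⟨hsub, hlen⟩
        exact List.eq_nil_of_length_eq_zero hlen
    | succ k =>
      simp only [combos, List.mem_append, List.mem_map]
      constructor
      · rintro (⟨t', ht', rfl⟩ | h)
        · rcases (ih k t').mp ht' with ⟨hsub, hlen⟩
          exact ⟨List.Sublist.cons₂ x hsub, by simp [hlen]⟩
        · rcases (ih (k + 1) t).mp h with ⟨hsub, hlen⟩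
          exact ⟨hsub.cons x, hlen⟩
      · rintro ⟨hsub, hlen⟩
        cases t with
        | nil => simp at hlen
        | cons y t' =>
          rcases List.sublist_cons_iff.mp hsub with hsub' | ⟨r, heq, hsub'⟩
          · exact Or.inr ((ih (k + 1) (y :: t')).mpr ⟨hsub', hlen⟩)
          · injection heq with hy ht
            subst hy; subst ht
            exact Or.inl ⟨t', (ih k t').mpr ⟨hsub', by simpa using hlen⟩, rfl⟩

theorem mem_combos3 {nums t : List Int} (h : t ∈ combos 3 nums) :
    t ∈ nums.sublists ∧ t.length = 3 := by
  rcases (mem_combos_iff nums 3 t).mp h with ⟨hsub, hlen⟩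
  exact ⟨List.mem_sublists.mpr hsub, hlen⟩

-- any 0/1-sum triple yields the whole of D_solution (including its two screening conjuncts)
theorem D_of_triple {nums t : List Int} (hts : t ∈ nums.sublists) (hlen : t.length = 3)
    (hsum : t.sum = 0 ∨ t.sum = 1) : D_solution nums := by
  have hsub := List.mem_sublists.mp hts
  match t, hlen with
  | [a, b, c], _ =>
    have hma : a ∈ nums := hsub.subset (by simp)
    have hmb : b ∈ nums := hsub.subset (by simp)
    have hmc : c ∈ nums := hsub.subset (by simp)
    have hsum' : a + b + c = 0 ∨ a + b + c = 1 := by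
      simpa [add_assoc] using hsum
    refine ⟨?_, ?_, [a, b, c], hts, rfl, hsum⟩
    · have h : a ≤ 0 ∨ b ≤ 0 ∨ c ≤ 0 := by omega
      rcases h with h | h | h
      exacts [⟨a, hma, h⟩, ⟨b, hmb, h⟩, ⟨c, hmc, h⟩]
    · have h : 0 ≤ a ∨ 0 ≤ b ∨ 0 ≤ c := by omega
      rcases h with h | h | h
      exacts [⟨a, hma, h⟩, ⟨b, hmb, h⟩, ⟨c, hmc, h⟩]

-- a one-sided countP comparison with a strict witness
theorem countP_le_of {α : Type} (l : List α) (p q : α → Bool)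
    (h : ∀ a ∈ l, q a = true → p a = true) : l.countP q ≤ l.countP p := by
  induction l with
  | nil => simp
  | cons a rest ih =>
    simp only [List.countP_cons]
    have h1 : rest.countP q ≤ rest.countP p := ih (fun a ha => h a (by simp [ha]))
    have h2 := h a (by simp)
    split_ifs <;> simp_all <;> omega

theorem countP_lt_of {α : Type} (l : List α) (p q : α → Bool)
    (h : ∀ a ∈ l, q a = true → p a = true)
    (a0 : α) (ha0 : a0 ∈ l) (hp : p a0 = true) (hq : q a0 = false) :
    l.countP q < l.countP p := by
  induction l with
  | nil => simp at ha0
  | cons a rest ih =>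
    simp only [List.countP_cons]
    rcases List.mem_cons.mp ha0 with rfl | hmem
    · have h1 : rest.countP q ≤ rest.countP p :=
        countP_le_of rest p q (fun b hb => h b (by simp [hb]))
      simp [hp, hq]; omega
    · have h1 : rest.countP q < rest.countP p :=
        ih (fun b hb => h b (by simp [hb])) hmem
      have h2 := h a (by simp)
      split_ifs <;> simp_all <;> omega

-- ===== VERDICT (by name: the statement is the Claim_ definition above) =====
theorem solution_spec : Claim_unchanged_solution := by
  intro nums _ hPre hD
  rw [solution_eq_countP, solution_alt_eq_countP]
  congr 1
  apply List.countP_congr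
  intro t ht
  have hts := mem_combos3 ht
  have hs0 : 0 ≤ t.sum := hPre t hts.1 hts.2
  have hs2 : 2 ≤ t.sum := by
    by_contra hc
    exact hD (D_of_triple hts.1 hts.2 (by omega))
  rw [← get_sosu_eq_is_prime hs2]
  simp

theorem solution_changed : Claim_changed_solution := by
  unfold Claim_changed_solution; decide

theorem solution_tight : Claim_exact_solution := by
  intro nums _ hPre ⟨_, _, t0, ht0s, ht0len, hsum⟩
  have ht0 : t0 ∈ combos 3 nums :=
    (mem_combos_iff nums 3 t0).mpr ⟨List.mem_sublists.mp ht0s, ht0len⟩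
  rw [solution_eq_countP, solution_alt_eq_countP]
  have hlt : (combos 3 nums).countP (fun t => is_prime t.sum)
      < (combos 3 nums).countP (fun t => decide (get_sosu t.sum = 1)) := by
    apply countP_lt_of _ _ _ ?_ t0 ht0 ?_ ?_
    · intro t ht hb
      have hts := mem_combos3 ht
      simp [a_of_b hb]
    · have : get_sosu t0.sum = 1 := by
        rcases hsum with h | h <;> rw [h] <;> decide
      simp [this]
    · rcases hsum with h | h <;> rw [h] <;> decide
  omega
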